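-- pv_equiv track=rewrite | github.com/jlefever/ghcollect | scripts/filter_repo_csv.py | join_singles
-- ===== SOURCE A (Python) =====
-- def join_singles(terms: list[str]) -> list[str]:
--     ret = []
--     joined_term = []
--     for t in terms:
--         if len(t) == 1:
--             joined_term.append(t[0])
--         elif len(t) > 1:
--             if len(joined_term) > 0:
--                 ret.append("".join(joined_term))
--                 joined_term = []
--             ret.append(t)
--     if len(joined_term) > 0:
--         ret.append("".join(joined_term))
--     return ret
-- ===== SOURCE B (Python) =====
-- def join_singles(terms: list[str]) -> list[str]:
--     # Drop empty strings (A treats them as transparent), then consume runs: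
--     # a maximal run of single-char terms is joined into one string, any
--     # longer term is copied through as-is.  No pending-accumulator state.
--     ts = [t for t in terms if t]
--     out = []
--     i = 0
--     n = len(ts)
--     while i < n:
--         if len(ts[i]) == 1:
--             j = i
--             while j < n and len(ts[j]) == 1:
--                 j += 1
--             out.append("".join(ts[i:j]))
--             i = j
--         else:
--             out.append(ts[i])
--             i += 1
--     return out
-- ===== Notes on version B (the rewrite author's own statement) =====
-- stated objective: idiomatic
-- what changed: B first filters out empty strings, then consumes the list run by run (a maximal run of single-char terms is sliced out and joined at once), replacing A's flush-the-accumulator state machine with stateless run consumption.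
import Mathlib
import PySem

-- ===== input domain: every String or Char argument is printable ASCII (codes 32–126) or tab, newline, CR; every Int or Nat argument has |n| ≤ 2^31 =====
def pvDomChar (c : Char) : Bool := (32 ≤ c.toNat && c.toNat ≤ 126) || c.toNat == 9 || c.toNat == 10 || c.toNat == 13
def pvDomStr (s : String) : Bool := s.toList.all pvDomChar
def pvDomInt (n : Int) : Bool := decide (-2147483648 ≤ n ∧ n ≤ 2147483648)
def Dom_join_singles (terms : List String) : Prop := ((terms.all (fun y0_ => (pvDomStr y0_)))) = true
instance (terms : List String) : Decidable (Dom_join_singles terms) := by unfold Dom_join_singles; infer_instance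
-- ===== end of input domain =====

-- B replaces A's flush-the-accumulator state machine by filtering out empty
-- strings and then consuming maximal runs of single-char terms at once (idiomatic).

-- ===== PORT A =====
-- state = (ret, joined_term); joined_term holds the chars t[0] collected so far
def joinStepA (st : List String × List Char) (t : String) : List String × List Char :=
  if PySem.Str.len t == 1 then
    -- joined_term.append(t[0]); index 0 is in range under the len == 1 guard
    (st.1, st.2 ++ [(PySem.Str.pyGet? t 0).getD ' '])
  else if PySem.Str.len t > 1 then
    if st.2.length > 0 then (st.1 ++ [String.ofList st.2, t], [])
    else (st.1 ++ [t], [])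
  else st

def join_singles (terms : List String) : List String :=
  let st := terms.foldl joinStepA ([], [])
  if st.2.length > 0 then st.1 ++ [String.ofList st.2] else st.1

-- ===== PORT B =====
def isSingleB (s : String) : Bool := PySem.Str.len s == 1

-- the outer while loop of Source B; the inner while loop is the takeWhile/dropWhile pair
def goB : List String → List String
  | [] => []
  | t :: ts =>
    if isSingleB t then
      PySem.Str.join "" (t :: ts.takeWhile isSingleB) :: goB (ts.dropWhile isSingleB)
    else
      t :: goB ts
termination_by l => l.length
decreasing_by
  · exact Nat.lt_succ_of_le (List.length_dropWhile_le _ _)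
  · exact Nat.lt_succ_self _

def join_singles_alt (terms : List String) : List String :=
  goB (terms.filter (fun t => PySem.Str.len t != 0))

-- ===== PRECONDITION & SPEC =====
def Spec_join_singles (terms : List String) (out : List String) : Prop := out = join_singles_alt terms
instance (terms : List String) (out : List String) : Decidable (Spec_join_singles terms out) := by unfold Spec_join_singles; infer_instance

-- ===== CLAIM (what is proved, stated in full; the proofs are below) =====
def Claim_equal_join_singles : Prop := ∀ (terms : List String), Dom_join_singles terms → Spec_join_singles terms (join_singles terms)

-- ===== LEMMAS AND PROOFS =====

theorem goB_nil : goB [] = [] := by rw [goB.eq_def]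

theorem goB_cons (t : String) (ts : List String) :
    goB (t :: ts) =
      if isSingleB t then
        PySem.Str.join "" (t :: ts.takeWhile isSingleB) :: goB (ts.dropWhile isSingleB)
      else t :: goB ts := by rw [goB.eq_def]

-- A's run as a recursion (finish applied to the fold from state cur)
def runA (cur : List Char) : List String → List String
  | [] => if cur.length > 0 then [String.ofList cur] else []
  | t :: ts =>
    if PySem.Str.len t == 1 then runA (cur ++ [(PySem.Str.pyGet? t 0).getD ' ']) ts
    else if PySem.Str.len t > 1 then
      (if cur.length > 0 then [String.ofList cur, t] else [t]) ++ runA [] ts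
    else runA cur ts

theorem foldA_eq_runA (l : List String) : ∀ (ret : List String) (cur : List Char),
    (let st := l.foldl joinStepA (ret, cur);
     if st.2.length > 0 then st.1 ++ [String.ofList st.2] else st.1) = ret ++ runA cur l := by
  induction l with
  | nil =>
    intro ret cur
    simp only [List.foldl_nil, runA]
    split <;> simp
  | cons t ts ih =>
    intro ret cur
    simp only [List.foldl_cons, runA, joinStepA]
    split
    · exact ih ret (cur ++ [(PySem.Str.pyGet? t 0).getD ' '])
    · split
      · split
        · rw [ih]; simp
        · rw [ih]; simp
      · exact ih ret cur

theorem runA_filter (l : List String) : ∀ cur,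
    runA cur l = runA cur (l.filter (fun t => PySem.Str.len t != 0)) := by
  induction l with
  | nil => intro cur; rfl
  | cons t ts ih =>
    intro cur
    by_cases h0 : t.toList.length = 0
    · have h1 : (PySem.Str.len t == 1) = false := by simp [h0]
      have h2 : ¬ (PySem.Str.len t > 1) := by simp [h0]
      have h3 : (PySem.Str.len t != 0) = false := by simp [h0]
      simp only [runA, h1, h2, List.filter_cons, h3, Bool.false_eq_true,
        if_false, ih]
    · have h3 : (PySem.Str.len t != 0) = true := by
        simp only [PySem.Str.len_eq, bne_iff_ne, ne_eq]
        intro h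
        exact h0 (by exact_mod_cast congrArg (fun z => z) (by exact_mod_cast h))
      simp only [List.filter_cons, h3, if_true]
      simp only [runA, ih]

theorem takeWhile_singles {p : String → Bool} (xs : List String) (t : String) (ts : List String)
    (hxs : ∀ x ∈ xs, p x = true) (ht : p t = false) :
    (xs ++ t :: ts).takeWhile p = xs ∧ (xs ++ t :: ts).dropWhile p = t :: ts := by
  induction xs with
  | nil => simp [ht]
  | cons x xs ih =>
    have hx : p x = true := hxs x (by simp)
    have := ih (fun y hy => hxs y (by simp [hy]))
    simp [hx, this.1, this.2]

theorem joinSingles (cs : List Char) :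
    PySem.Str.join "" (cs.map (fun c => String.ofList [c])) = String.ofList cs := by
  simp [PySem.Str.join, Function.comp_def, PySem.Chars.join_nil_singletons]

theorem goB_all_singles (cur : List Char) :
    goB (cur.map (fun c => String.ofList [c])) =
      if cur.length > 0 then [String.ofList cur] else [] := by
  cases cur with
  | nil => simp [goB_nil]
  | cons c cs =>
    have hall : ∀ x ∈ cs.map (fun c => String.ofList [c]), isSingleB x = true := by
      intro x hx
      simp only [List.mem_map] at hx
      obtain ⟨y, _, rfl⟩ := hx
      simp [isSingleB]
    rw [List.map_cons, goB_cons]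
    have hs : isSingleB (String.ofList [c]) = true := by simp [isSingleB]
    have hm : String.ofList [c] :: List.map (fun c => String.ofList [c]) cs
        = (c :: cs).map (fun c => String.ofList [c]) := rfl
    rw [if_pos hs, List.takeWhile_eq_self_iff.mpr hall, List.dropWhile_eq_nil_iff.mpr
      (fun x hx => by simp [hall x hx]), goB_nil, hm, joinSingles]
    simp

theorem goB_singles_prefix (cur : List Char) (t : String) (ts : List String)
    (ht : isSingleB t = false) :
    goB (cur.map (fun c => String.ofList [c]) ++ t :: ts) =
      (if cur.length > 0 then [String.ofList cur, t] else [t]) ++ goB ts := by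
  cases cur with
  | nil => simp [goB, ht]
  | cons c cs =>
    have hall : ∀ x ∈ cs.map (fun c => String.ofList [c]), isSingleB x = true := by
      intro x hx
      simp only [List.mem_map] at hx
      obtain ⟨y, _, rfl⟩ := hx
      simp [isSingleB]
    have htw := takeWhile_singles (cs.map (fun c => String.ofList [c])) t ts hall ht
    rw [List.map_cons, List.cons_append, goB_cons]
    have hs : isSingleB (String.ofList [c]) = true := by simp [isSingleB]
    have hm : String.ofList [c] :: List.map (fun c => String.ofList [c]) cs
        = (c :: cs).map (fun c => String.ofList [c]) := rfl
    rw [if_pos hs, htw.1, htw.2, goB_cons, if_neg (by simp [ht]), hm, joinSingles]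
    simp

theorem single_eq_ofList {t : String} (h : (PySem.Str.len t == 1) = true) :
    String.ofList [(PySem.Str.pyGet? t 0).getD ' '] = t := by
  have hlen : t.toList.length = 1 := by simpa using h
  obtain ⟨c, hc⟩ : ∃ c, t.toList = [c] := by
    cases hl : t.toList with
    | nil => simp [hl] at hlen
    | cons a l =>
      cases l with
      | nil => exact ⟨a, rfl⟩
      | cons b l' => simp [hl] at hlen
  have h2 : PySem.Str.pyGet? t 0 = some c := by
    simp [hc]
  rw [h2, Option.getD_some]
  calc String.ofList [c] = String.ofList t.toList := by rw [hc]
    _ = t := by simp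

theorem runA_eq_goB (l : List String) (hl : ∀ t ∈ l, t.toList ≠ []) : ∀ cur,
    runA cur l = goB (cur.map (fun c => String.ofList [c]) ++ l) := by
  induction l with
  | nil =>
    intro cur
    simp only [List.append_nil, runA, goB_all_singles]
  | cons t ts ih =>
    intro cur
    have hts : ∀ x ∈ ts, x.toList ≠ [] := fun x hx => hl x (by simp [hx])
    by_cases h1 : (PySem.Str.len t == 1) = true
    · rw [runA, if_pos h1, ih hts]
      have hmap : (cur ++ [(PySem.Str.pyGet? t 0).getD ' ']).map (fun c => String.ofList [c])
          = cur.map (fun c => String.ofList [c]) ++ [t] := by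
        rw [List.map_append, List.map_singleton, single_eq_ofList h1]
      rw [hmap, List.append_assoc, List.singleton_append]
    · have ht0 : t.toList ≠ [] := hl t (by simp)
      have h2 : PySem.Str.len t > 1 := by
        simp only [PySem.Str.len_eq] at *
        have : t.toList.length ≠ 1 := by simpa using h1
        have : t.toList.length ≠ 0 := by simpa using ht0
        omega
      rw [runA, if_neg h1, if_pos h2, ih hts,
        goB_singles_prefix cur t ts (by simpa [isSingleB] using h1)]
      simp

-- ===== VERDICT (by name: the statement is the Claim_ definition above) =====
theorem join_singles_spec : Claim_equal_join_singles := by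
  intro terms _
  unfold Spec_join_singles join_singles join_singles_alt
  rw [foldA_eq_runA, List.nil_append, runA_filter]
  rw [runA_eq_goB _ (fun t ht => by
    have := (List.mem_filter.mp ht).2
    simpa using this)]
  simp
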